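-- pv_equiv track=rewrite | github.com/b1ch0u/zelevinsky-conjecture | test.py | find_possible_wmu
-- ===== SOURCE A (Python) =====
-- import itertools
--
-- def dominates(u, v):
--     ''' Test if u dominates v.
--     u is said to dominate v if u_i >= v_i for all i.
--
--     >>> dominates([1], [0])
--     True
--
--     >>> dominates([1,1], [0,1])
--     True
--
--     >>> dominates([1,1,1], [0,1,2])
--     False
--     '''
--     return all(u_i >= v_i for u_i,v_i in zip(u, v))
--
-- def is_dk(v):
--     ''' Test if v is in D_k.
--     Elems of D_k are those  v such that v1 - 1 >= v2 - 2 >= ... >= v_k - k.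
--
--     >>> is_dk([0])
--     True
--
--     >>> is_dk([0,1])
--     True
--
--     >>> is_dk([1,3])
--     False
--
--     >>> is_dk([1,2,0,5])
--     False
--
--     >>> is_dk([3,2,0,1])
--     True
--     '''
--     d = [e - (i + 1) for i,e in enumerate(v)] # the +1 comes from python's
--                                                 # indexing from 0
--     return all(d[i] >= d[i + 1] for i in range(len(d) - 1))
--
-- def perm_inv(w):
--     ''' Inverse a permutation w.
--
--     >>> perm_inv([])
--     []
--
--     >>> perm_inv([0])
--     [0]
--
--     >>> perm_inv([0,1])
--     [0, 1]
--
--     >>> perm_inv([0,1,2])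
--     [0, 1, 2]
--
--     >>> perm_inv([0,2,1])
--     [0, 2, 1]
--
--     >>> perm_inv([4,0,3,2,1])
--     [1, 4, 3, 2, 0]
--     '''
--     res = [0] * len(w)
--     for i,e in enumerate(w):
--         res[e] = i
--     return res
--
-- def find_possible_wmu(l, order, k):
--     # TODO convert to np arr
--     res = []
--     wmu = [e[0] + i for i,e in enumerate(order)]
--     if not dominates(l, wmu): # standard form requires : lambda >= w*mu
--         return []
--     for w_inv in itertools.permutations(range(k)):
--         wmu_minus_id = [a - b for a,b in zip(wmu, range(0, k))]
--         mu_inv = [a + b for a,b in zip(wmu_minus_id, w_inv)]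
--         w = perm_inv(w_inv)
--         mu = [mu_inv[w[i]] for i in range(k)]
--         if is_dk(mu):
--             res.append((w, mu, wmu))
--     return res
-- ===== SOURCE B (Python) =====
-- def find_possible_wmu(l, order, k):
--     # B: instead of scanning all k! permutations and testing is_dk, observe that
--     # mu is in D_k exactly when the c-values c[i] = order[i][0] are non-increasing
--     # along w; enumerate only those permutations directly, in the same
--     # (lexicographic-in-w_inv) order, by restricting each w_inv[i] to the block
--     # of positions its c-value may occupy.
--     wmu = [e[0] + i for i, e in enumerate(order)]
--     if not all(a >= b for a, b in zip(l, wmu)):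
--         return []
--     n = k if k > 0 else 0
--     c = [order[i][0] for i in range(n)]
--     bounds = [(sum(1 for x in c if x > ci), sum(1 for x in c if x >= ci)) for ci in c]
--
--     def gen(bs, used):
--         if not bs:
--             return [[]]
--         lo, hi = bs[0]
--         out = []
--         for p in range(lo, hi):
--             if p not in used:
--                 out += [[p] + tail for tail in gen(bs[1:], [p] + used)]
--         return out
--
--     res = []
--     for w_inv in gen(bounds, []):
--         w = [0] * len(w_inv)
--         for i, p in enumerate(w_inv):
--             w[p] = i
--         mu = [c[w[j]] + j for j in range(n)]
--         res.append((w, mu, wmu))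
--     return res
-- ===== Notes on version B (the rewrite author's own statement) =====
-- stated objective: faster
-- what changed: A enumerates all k! permutations and tests each induced mu with is_dk; B reduces the is_dk test to 'c-values (c[i]=order[i][0]) non-increasing along w', precomputes for each index its block of admissible positions, and generates only the valid permutations by a backtracking enumeration that never hits a dead end, producing them in A's exact order.
import Mathlib
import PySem

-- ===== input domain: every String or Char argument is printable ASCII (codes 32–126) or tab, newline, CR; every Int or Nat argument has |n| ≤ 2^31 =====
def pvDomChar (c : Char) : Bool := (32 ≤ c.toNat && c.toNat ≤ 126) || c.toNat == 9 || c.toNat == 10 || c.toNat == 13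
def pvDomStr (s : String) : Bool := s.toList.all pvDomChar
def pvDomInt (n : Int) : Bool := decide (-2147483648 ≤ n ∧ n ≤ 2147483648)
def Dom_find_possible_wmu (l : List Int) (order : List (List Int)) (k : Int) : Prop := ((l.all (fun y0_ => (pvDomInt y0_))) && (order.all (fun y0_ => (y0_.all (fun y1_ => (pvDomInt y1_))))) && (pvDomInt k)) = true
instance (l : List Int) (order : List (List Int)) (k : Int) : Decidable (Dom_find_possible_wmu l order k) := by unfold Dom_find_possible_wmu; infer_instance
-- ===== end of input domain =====

-- B replaces A's scan of all k! permutations by a backtracking enumeration that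
-- generates, in the same order, only the permutations whose induced mu lies in D_k
-- (objective: faster; the is_dk test reduces to per-index position blocks).

-- ===== PORT A =====
def dominates (u v : List Int) : Bool :=
  (u.zip v).all (fun ab => decide (ab.2 ≤ ab.1))

def is_dk (v : List Int) : Bool :=
  let d := (PySem.List.enumerate v).map (fun ie => ie.2 - (ie.1 + 1))
  -- d[i] / d[i+1]: indices produced by range(len(d)-1), always in range, so getD is exact
  (List.range (d.length - 1)).all (fun i => decide (d.getD (i + 1) 0 ≤ d.getD i 0))

def perm_inv (w : List Int) : List Int :=
  -- res[e] = i : pySetD is exact Python list assignment for in-range e (A only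
  -- calls perm_inv on permutations of range(k), whose entries are in range)
  (PySem.List.enumerate w).foldl (fun res ie => PySem.List.pySetD res ie.2 ie.1)
    (List.replicate w.length 0)

def find_possible_wmu (l : List Int) (order : List (List Int)) (k : Int) : List (List Int × List Int × List Int) :=
  -- e[0]: in range under Pre_ (every row of order nonempty), so pyGetD is exact
  let wmu := (PySem.List.enumerate order).map (fun ie => PySem.List.pyGetD ie.2 0 0 + ie.1)
  if !(dominates l wmu) then []
  else
    (PySem.List.permutations (PySem.List.pyRange 0 k 1) (PySem.List.pyRange 0 k 1).length).foldl
      (fun res w_inv =>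
        let wmu_minus_id := (wmu.zip (PySem.List.pyRange 0 k 1)).map (fun ab => ab.1 - ab.2)
        let mu_inv := (wmu_minus_id.zip w_inv).map (fun ab => ab.1 + ab.2)
        let w := perm_inv w_inv
        -- mu_inv[w[i]]: in range under Pre_ (k ≤ len(order)), so pyGetD is exact
        let mu := (PySem.List.pyRange 0 k 1).map (fun i => PySem.List.pyGetD mu_inv (PySem.List.pyGetD w i 0) 0)
        if is_dk mu then res ++ [(w, mu, wmu)] else res) []

-- ===== PORT B =====
def bGen (bs : List (Int × Int)) (used : List Int) : List (List Int) :=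
  match bs with
  | [] => [[]]
  | b :: rest =>
    (PySem.List.pyRange b.1 b.2 1).foldl
      (fun out p => if p ∉ used then out ++ (bGen rest (p :: used)).map (fun tail => p :: tail) else out) []

def find_possible_wmu_alt (l : List Int) (order : List (List Int)) (k : Int) : List (List Int × List Int × List Int) :=
  let wmu := (PySem.List.enumerate order).map (fun ie => PySem.List.pyGetD ie.2 0 0 + ie.1)
  if !((l.zip wmu).all (fun ab => decide (ab.2 ≤ ab.1))) then []
  else
    let n : Int := if 0 < k then k else 0
    -- order[i][0] for i in range(n): in range under Pre_, so pyGetD is exact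
    let c := (PySem.List.pyRange 0 n 1).map (fun i => PySem.List.pyGetD (PySem.List.pyGetD order i []) 0 0)
    let bounds := c.map (fun ci =>
      (((c.filter (fun x => decide (ci < x))).length : Int),
       ((c.filter (fun x => decide (ci ≤ x))).length : Int)))
    (bGen bounds []).foldl
      (fun res w_inv =>
        let w := (PySem.List.enumerate w_inv).foldl (fun w ip => PySem.List.pySetD w ip.2 ip.1)
          (List.replicate w_inv.length 0)
        let mu := (PySem.List.pyRange 0 n 1).map (fun j => PySem.List.pyGetD c (PySem.List.pyGetD w j 0) 0 + j)
        res ++ [(w, mu, wmu)]) []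

-- ===== PRECONDITION & SPEC =====
-- Pre_ excludes exactly the inputs on which Python A raises IndexError: an empty
-- row of order (at e[0]), or k > len(order) while l dominates w*mu (at mu_inv[w[i]]);
-- B raises on exactly the same inputs.
def Pre_find_possible_wmu (l : List Int) (order : List (List Int)) (k : Int) : Prop :=
  (∀ e ∈ order, e ≠ []) ∧
  (((l.zip ((PySem.List.enumerate order).map (fun ie => PySem.List.pyGetD ie.2 0 0 + ie.1))).all
      (fun ab => decide (ab.2 ≤ ab.1))) = true → k ≤ (order.length : Int))
instance (l : List Int) (order : List (List Int)) (k : Int) : Decidable (Pre_find_possible_wmu l order k) := by unfold Pre_find_possible_wmu; infer_instance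

def pvWitness_find_possible_wmu : List Int × List (List Int) × Int := ([5], [[1]], 1)

def Spec_find_possible_wmu (l : List Int) (order : List (List Int)) (k : Int) (out : List (List Int × List Int × List Int)) : Prop := out = find_possible_wmu_alt l order k
instance (l : List Int) (order : List (List Int)) (k : Int) (out : List (List Int × List Int × List Int)) : Decidable (Spec_find_possible_wmu l order k out) := by unfold Spec_find_possible_wmu; infer_instance

-- ===== CLAIM (what is proved, stated in full; the proofs are below) =====
def Claim_equal_find_possible_wmu : Prop := ∀ (l : List Int) (order : List (List Int)) (k : Int), Dom_find_possible_wmu l order k → Pre_find_possible_wmu l order k → Spec_find_possible_wmu l order k (find_possible_wmu l order k)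


-- ===== LEMMAS AND PROOFS =====

-- generic facts about the write-loop used by perm_inv / B's inversion loop
lemma foldl_pySetD_length (ps : List (Int × Int)) (init : List Int) :
    (ps.foldl (fun res ie => PySem.List.pySetD res ie.2 ie.1) init).length = init.length := by
  induction ps generalizing init with
  | nil => rfl
  | cons q ps ih => simp only [List.foldl_cons, ih, PySem.List.length_pySetD]

lemma foldl_pySetD_getD (ps : List (Int × Int)) (init : List Int) (m : Nat)
    (hm : m < init.length) (hpos : ∀ p ∈ ps, 0 ≤ p.2) :
    (ps.foldl (fun res ie => PySem.List.pySetD res ie.2 ie.1) init).getD m 0 =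
      (match ps.reverse.find? (fun p => p.2 == (m : Int)) with
       | some p => p.1
       | none => init.getD m 0) := by
  induction ps using List.reverseRecOn with
  | nil => simp
  | append_singleton ps q ih =>
    have hq : 0 ≤ q.2 := hpos q (by simp)
    have hps : ∀ p ∈ ps, 0 ≤ p.2 := fun p hp => hpos p (by simp [hp])
    have hlen : (ps.foldl (fun res ie => PySem.List.pySetD res ie.2 ie.1) init).length = init.length :=
      foldl_pySetD_length ps init
    rw [List.foldl_append]
    simp only [List.foldl_cons, List.foldl_nil, List.reverse_append, List.reverse_cons,
      List.reverse_nil, List.nil_append, List.cons_append, List.find?_cons]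
    rw [PySem.List.pySetD_of_nonneg _ _ hq]
    by_cases hqm : q.2 = (m : Int)
    · have ht : q.2.toNat = m := by omega
      have hbeq : (q.2 == (m : Int)) = true := by simp [hqm]
      simp only [hbeq]
      rw [List.getD_eq_getElem?_getD, List.getElem?_set, if_pos ht,
        if_pos (by rw [hlen]; omega)]
      rfl
    · have hne : (q.2 == (m : Int)) = false := by simp [hqm]
      have htn : q.2.toNat ≠ m := by omega
      simp only [hne]
      rw [List.getD_eq_getElem?_getD, List.getElem?_set, if_neg htn,
        ← List.getD_eq_getElem?_getD, ih hps]

lemma perm_bounds {kI : Int} {wi : List Int} (hp : wi.Perm (PySem.List.pyRange 0 kI 1)) :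
    ∀ x ∈ wi, 0 ≤ x ∧ x < kI := by
  intro x hx
  have := (hp.mem_iff).mp hx
  rwa [PySem.List.mem_pyRange_one] at this

lemma perm_len {kI : Int} {wi : List Int} (hp : wi.Perm (PySem.List.pyRange 0 kI 1)) :
    (wi.length : Int) = max kI 0 := by
  have := hp.length_eq
  rw [PySem.List.length_pyRange_one] at this
  omega

lemma perm_inv_spec {kI : Int} {wi : List Int} (hp : wi.Perm (PySem.List.pyRange 0 kI 1))
    (m : Nat) (hm : m < wi.length) :
    ∃ (i : Nat) (hi : i < wi.length), (perm_inv wi).getD m 0 = (i : Int) ∧ wi[i] = (m : Int) := by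
  have hmem : ((m : Int)) ∈ wi := by
    rw [hp.mem_iff, PySem.List.mem_pyRange_one]
    have := perm_len hp
    omega
  obtain ⟨i0, hi0, hwi0⟩ := List.mem_iff_getElem.mp hmem
  have hpos : ∀ p ∈ PySem.List.enumerate wi, 0 ≤ p.2 := by
    intro p hpmem
    obtain ⟨j, hj, rfl⟩ := (PySem.List.mem_enumerate_iff wi 0 p).mp hpmem
    exact (perm_bounds hp _ (List.getElem_mem hj)).1
  have hfind : (List.find? (fun p => p.2 == (m : Int)) (PySem.List.enumerate wi).reverse).isSome := by
    rw [List.find?_isSome]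
    refine ⟨(0 + (i0 : Int), wi[i0]), ?_, by simp [hwi0]⟩
    rw [List.mem_reverse]
    exact (PySem.List.mem_enumerate_iff wi 0 _).mpr ⟨i0, hi0, rfl⟩
  obtain ⟨pr, hpr⟩ := Option.isSome_iff_exists.mp hfind
  have hmempr : pr ∈ PySem.List.enumerate wi := List.mem_reverse.mp (List.mem_of_find?_eq_some hpr)
  obtain ⟨i, hi, hpr2⟩ := (PySem.List.mem_enumerate_iff wi 0 pr).mp hmempr
  have hpm : pr.2 = (m : Int) := by have := List.find?_some hpr; simpa using this
  refine ⟨i, hi, ?_, ?_⟩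
  · unfold perm_inv
    rw [foldl_pySetD_getD _ _ m (by simpa using hm) hpos, hpr, hpr2]
    simp
  · rw [← hpm, hpr2]

lemma perm_inv_at {kI : Int} {wi : List Int} (hp : wi.Perm (PySem.List.pyRange 0 kI 1))
    (i : Nat) (hi : i < wi.length) :
    (perm_inv wi).getD (wi[i]).toNat 0 = (i : Int) := by
  have hb := perm_bounds hp wi[i] (List.getElem_mem hi)
  have hl := perm_len hp
  have hm : (wi[i]).toNat < wi.length := by omega
  obtain ⟨i', hi', hgd, hwi'⟩ := perm_inv_spec hp (wi[i]).toNat hm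
  have hnd : wi.Nodup := hp.nodup_iff.mpr (PySem.List.nodup_pyRange_one 0 kI)
  have heq : wi[i'] = wi[i] := by rw [hwi']; omega
  have : i' = i := (List.Nodup.getElem_inj_iff hnd).mp heq
  rw [hgd, this]

-- the position-by-position selection structure behind itertools.permutations
def pick : List Int → List (Int × List Int)
  | [] => []
  | x :: xs => (x, xs) :: (pick xs).map (fun al => (al.1, x :: al.2))

lemma map_fst_pick (xs : List Int) : (pick xs).map (fun al => al.1) = xs := by
  induction xs with
  | nil => rfl
  | cons x xs ih => simp only [pick, List.map_cons, List.map_map]; rw [show ((fun al : Int × List Int => al.1) ∘ fun al : Int × List Int => (al.1, x :: al.2)) = fun al : Int × List Int => al.1 from rfl, ih]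

lemma mem_pick : ∀ (xs : List Int), xs.Nodup → ∀ al ∈ pick xs, al.1 ∈ xs ∧ al.2 = xs.erase al.1 := by
  intro xs
  induction xs with
  | nil => intro _ al h; simp [pick] at h
  | cons x xs ih =>
    intro hnd al h
    simp only [pick, List.mem_cons, List.mem_map] at h
    rcases h with rfl | ⟨al', hal', rfl⟩
    · simp
    · have hnd' : xs.Nodup := (List.nodup_cons.mp hnd).2
      have hx : x ∉ xs := (List.nodup_cons.mp hnd).1
      obtain ⟨h1, h2⟩ := ih hnd' al' hal'
      refine ⟨by simp [h1], ?_⟩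
      have hne : al'.1 ≠ x := fun hc => hx (hc ▸ h1)
      simp only [List.erase_cons]
      rw [if_neg (by simpa using hne.symm)]
      simp [h2]

lemma flatMap_range_eq_pick {β : Type} (xs : List Int) (G : Int → List Int → List β) :
    (List.range xs.length).flatMap
      (fun i => match xs[i]? with | none => [] | some a => G a (xs.eraseIdx i))
    = (pick xs).flatMap (fun al => G al.1 al.2) := by
  induction xs generalizing G with
  | nil => rfl
  | cons x xs ih =>
    rw [List.length_cons, List.range_succ_eq_map, List.flatMap_cons, List.flatMap_map]
    simp only [pick, List.flatMap_cons, List.flatMap_map,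
      Nat.succ_eq_add_one, List.getElem?_cons_succ, List.getElem?_cons_zero,
      List.eraseIdx_cons_succ, List.eraseIdx_cons_zero]
    congr 1
    rw [List.flatMap_congr (g := fun i => match xs[i]? with
        | none => ([] : List β)
        | some a => (fun a l => G a (x :: l)) a (xs.eraseIdx i)) (fun i _ => rfl)]
    exact ih (fun a l => G a (x :: l))

lemma perms_succ (xs : List Int) (r : Nat) :
    PySem.List.permutations xs (r + 1)
      = (pick xs).flatMap (fun al => (PySem.List.permutations al.2 r).map (fun p => al.1 :: p)) := by
  rw [PySem.List.permutations]
  rw [← flatMap_range_eq_pick xs (fun a rest => (PySem.List.permutations rest r).map (fun p => a :: p))]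
  apply List.flatMap_congr
  intro i _
  cases h : xs[i]? <;> simp

-- the per-index bounds test B's generator enforces
def chk : List (Int × Int) → List Int → Bool
  | [], [] => true
  | b :: bs, p :: ps => ((decide (b.1 ≤ p) && decide (p < b.2)) && chk bs ps)
  | _, _ => false

lemma chk_iff (bs : List (Int × Int)) (ps : List Int) (hl : ps.length = bs.length) :
    chk bs ps = true ↔ ∀ i : Nat, i < bs.length →
      ((bs.getD i (0, 0)).1 ≤ ps.getD i 0 ∧ ps.getD i 0 < (bs.getD i (0, 0)).2) := by
  induction bs generalizing ps with
  | nil =>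
    cases ps with
    | nil => simp [chk]
    | cons p ps => simp at hl
  | cons b bs ih =>
    cases ps with
    | nil => simp at hl
    | cons p ps =>
      simp only [chk, Bool.and_eq_true, decide_eq_true_eq]
      rw [ih ps (by simpa using hl)]
      constructor
      · rintro ⟨⟨h1, h2⟩, h3⟩ i hi
        cases i with
        | zero => simpa using ⟨h1, h2⟩
        | succ i => simpa using h3 i (by simpa using hi)
      · intro h
        refine ⟨?_, fun i hi => ?_⟩
        · simpa using h 0 (by simp)
        · simpa using h (i + 1) (by simpa using hi)

-- two strictly increasing lists with the same members are equal
lemma eq_of_mem_iff_of_pairwise_lt {l1 l2 : List Int}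
    (h1 : l1.Pairwise (· < ·)) (h2 : l2.Pairwise (· < ·))
    (hm : ∀ x, x ∈ l1 ↔ x ∈ l2) : l1 = l2 := by
  have e1 : PySem.List.sorted l2 (fun x => x) = l1 := by
    apply PySem.List.sorted_eq_of_perm_of_pairwise_lt
    · exact (List.perm_ext_iff_of_nodup (h1.imp ne_of_lt) (h2.imp ne_of_lt)).mpr hm
    · exact h1
  have e2 : PySem.List.sorted l2 (fun x => x) = l2 :=
    PySem.List.sorted_eq_of_perm_of_pairwise_lt _ _ _ (List.Perm.refl l2) h2
  rw [← e1, e2]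

lemma flatMap_if_eq_filter_flatMap {β : Type} (l : List Int) (q : Int → Bool) (K : Int → List β) :
    l.flatMap (fun a => if q a then K a else []) = (l.filter q).flatMap K := by
  induction l with
  | nil => rfl
  | cons x l ih =>
    by_cases h : q x
    · simp [List.flatMap_cons, h, ih]
    · simp [List.flatMap_cons, h, ih]

-- CORE: B's backtracking generator enumerates exactly the bound-respecting
-- permutations, in the order itertools.permutations produces them
lemma filter_perms_eq_bGen (nI : Int) : ∀ (bs : List (Int × Int)) (avail used : List Int),
    avail.Pairwise (· < ·) →
    (∀ p : Int, p ∈ avail ↔ (0 ≤ p ∧ p < nI ∧ p ∉ used)) →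
    (∀ b ∈ bs, 0 ≤ b.1 ∧ b.2 ≤ nI) →
    avail.length = bs.length →
    (PySem.List.permutations avail bs.length).filter (chk bs) = bGen bs used := by
  intro bs
  induction bs with
  | nil =>
    intro avail used _ _ _ hlen
    have : avail = [] := List.eq_nil_of_length_eq_zero (by simpa using hlen)
    subst this
    simp [PySem.List.permutations_zero, bGen, chk]
  | cons b bs ih =>
    intro avail used hpw hmem hb hlen
    have hnd : avail.Nodup := hpw.imp ne_of_lt
    simp only [List.length_cons]
    rw [perms_succ, List.filter_flatMap]
    have hstep : ∀ al ∈ pick avail,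
        ((PySem.List.permutations al.2 bs.length).map (fun p => al.1 :: p)).filter (chk (b :: bs))
        = (fun a => if (decide (b.1 ≤ a) && decide (a < b.2)) then
            (bGen bs (a :: used)).map (fun p => a :: p) else []) al.1 := by
      intro al hal
      obtain ⟨hal1, hal2⟩ := mem_pick avail hnd al hal
      show _ = if (decide (b.1 ≤ al.1) && decide (al.1 < b.2)) = true then
          (bGen bs (al.1 :: used)).map (fun p => al.1 :: p) else []
      rw [List.filter_map]
      have hfc : ((chk (b :: bs)) ∘ (fun p => al.1 :: p)) =
          fun p => ((decide (b.1 ≤ al.1) && decide (al.1 < b.2)) && chk bs p) := rfl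
      rw [hfc]
      by_cases hq : (decide (b.1 ≤ al.1) && decide (al.1 < b.2)) = true
      · rw [if_pos hq]
        have : (fun p => ((decide (b.1 ≤ al.1) && decide (al.1 < b.2)) && chk bs p))
            = fun p => chk bs p := by funext p; rw [hq, Bool.true_and]
        rw [this]
        congr 1
        apply ih al.2 (al.1 :: used)
        · exact hal2 ▸ hpw.sublist (List.erase_sublist)
        · intro p
          rw [hal2, List.Nodup.mem_erase_iff hnd, hmem p]
          simp only [List.mem_cons, not_or]
          constructor
          · rintro ⟨hne, h0, h1, h2⟩; exact ⟨h0, h1, hne, h2⟩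
          · rintro ⟨h0, h1, hne, h2⟩; exact ⟨hne, h0, h1, h2⟩
        · exact fun b' hb' => hb b' (by simp [hb'])
        · rw [hal2, List.length_erase_of_mem hal1]
          simp at hlen ⊢
          omega
      · rw [if_neg hq]
        have : (fun p => ((decide (b.1 ≤ al.1) && decide (al.1 < b.2)) && chk bs p))
            = fun _ => false := by
          funext p; rw [Bool.eq_false_iff.mpr hq, Bool.false_and]
        rw [this, List.filter_false]
        simp
    rw [List.flatMap_congr (h := hstep)]
    have hfl : (pick avail).flatMap
        ((fun a => if (decide (b.1 ≤ a) && decide (a < b.2)) then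
            (bGen bs (a :: used)).map (fun p => a :: p) else []) ∘ (fun al => al.1))
        = avail.flatMap (fun a => if (decide (b.1 ≤ a) && decide (a < b.2)) then
            (bGen bs (a :: used)).map (fun p => a :: p) else []) := by
      conv_rhs => rw [← map_fst_pick avail]
      rw [List.flatMap_map]
      exact List.flatMap_congr (fun al _ => rfl)
    rw [show ((pick avail).flatMap fun al =>
        (fun a => if (decide (b.1 ≤ a) && decide (a < b.2)) then
            (bGen bs (a :: used)).map (fun p => a :: p) else []) al.1) =
        ((pick avail).flatMap
        ((fun a => if (decide (b.1 ≤ a) && decide (a < b.2)) then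
            (bGen bs (a :: used)).map (fun p => a :: p) else []) ∘ (fun al => al.1))) from rfl, hfl]
    rw [flatMap_if_eq_filter_flatMap]
    -- right-hand side: unfold B's fold into the same flatMap
    show _ = bGen (b :: bs) used
    rw [show bGen (b :: bs) used = (PySem.List.pyRange b.1 b.2 1).foldl
      (fun out p => if p ∉ used then out ++ (bGen bs (p :: used)).map (fun tail => p :: tail) else out) [] from rfl]
    rw [PySem.List.foldl_ite_eq_foldl_filter, PySem.List.foldl_append_eq_flatMap, List.nil_append]
    congr 1
    apply eq_of_mem_iff_of_pairwise_lt
    · exact hpw.filter _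
    · exact (PySem.List.pairwise_lt_pyRange_one b.1 b.2).filter _
    · intro x
      have hbb := hb b (by simp)
      simp only [List.mem_filter, hmem x, PySem.List.mem_pyRange_one,
        Bool.and_eq_true, decide_eq_true_eq]
      constructor
      · rintro ⟨⟨h0, h1, h2⟩, h3, h4⟩; exact ⟨⟨h3, h4⟩, by simpa using h2⟩
      · rintro ⟨⟨h3, h4⟩, h2⟩
        refine ⟨⟨by omega, by omega, by simpa using h2⟩, h3, h4⟩


-- names for the intermediate lists both ports build
def wmuOf (order : List (List Int)) : List Int :=
  (PySem.List.enumerate order).map (fun ie => PySem.List.pyGetD ie.2 0 0 + ie.1)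

def cListOf (order : List (List Int)) (k : Int) : List Int :=
  (PySem.List.pyRange 0 k 1).map (fun i => PySem.List.pyGetD (PySem.List.pyGetD order i []) 0 0)

def bndsOf (order : List (List Int)) (k : Int) : List (Int × Int) :=
  (cListOf order k).map (fun ci =>
    ((((cListOf order k).filter (fun x => decide (ci < x))).length : Int),
     (((cListOf order k).filter (fun x => decide (ci ≤ x))).length : Int)))

def muInvOf (order : List (List Int)) (k : Int) (wi : List Int) : List Int :=
  ((((wmuOf order).zip (PySem.List.pyRange 0 k 1)).map (fun ab => ab.1 - ab.2)).zip wi).map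
    (fun ab => ab.1 + ab.2)

def muAOf (order : List (List Int)) (k : Int) (wi : List Int) : List Int :=
  (PySem.List.pyRange 0 k 1).map
    (fun i => PySem.List.pyGetD (muInvOf order k wi) (PySem.List.pyGetD (perm_inv wi) i 0) 0)

def muBOf (order : List (List Int)) (k : Int) (wi : List Int) : List Int :=
  (PySem.List.pyRange 0 k 1).map
    (fun j => PySem.List.pyGetD (cListOf order k) (PySem.List.pyGetD (perm_inv wi) j 0) 0 + j)

lemma pyRange_zero_toNat (k : Int) :
    PySem.List.pyRange 0 k 1 = PySem.List.pyRange 0 ((k.toNat : Int)) 1 := by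
  rw [PySem.List.pyRange_one, PySem.List.pyRange_one]
  congr 2
  omega

lemma length_cListOf (order : List (List Int)) (k : Int) :
    (cListOf order k).length = k.toNat := by
  simp [cListOf, PySem.List.length_pyRange_one]

lemma length_bndsOf (order : List (List Int)) (k : Int) :
    (bndsOf order k).length = k.toNat := by
  simp [bndsOf, length_cListOf]

lemma getD_cListOf (order : List (List Int)) (k : Int) (j : Nat) (hj : j < k.toNat) :
    (cListOf order k).getD j 0 = (order.getD j []).getD 0 0 := by
  have hl : j < (cListOf order k).length := by rw [length_cListOf]; exact hj
  rw [List.getD_eq_getElem _ _ hl]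
  unfold cListOf
  rw [List.getElem_map, PySem.List.getElem_pyRange_one]
  simp [PySem.List.pyGetD_zero]

lemma length_wmuOf (order : List (List Int)) : (wmuOf order).length = order.length := by
  rw [wmuOf, PySem.List.enumerate_eq_map_pyRange order []]
  simp [PySem.List.length_pyRange_one, PySem.List.len]

lemma getD_wmuOf (order : List (List Int)) (j : Nat) (hj : j < order.length) :
    (wmuOf order).getD j 0 = (order.getD j []).getD 0 0 + j := by
  have he : wmuOf order = (PySem.List.pyRange 0 ((order.length : Nat) : Int) 1).map
      (fun i => PySem.List.pyGetD (PySem.List.pyGetD order i []) 0 0 + i) := by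
    rw [wmuOf, PySem.List.enumerate_eq_map_pyRange order [], List.map_map]
    simp [PySem.List.len, Function.comp_def]
  rw [he, List.getD_eq_getElem?_getD, PySem.List.getElem?_map_pyRange_zero _ _ _ hj]
  simp [PySem.List.pyGetD_zero]

lemma wmid_eq_cList (order : List (List Int)) (k : Int) (hk : k ≤ (order.length : Int)) :
    ((wmuOf order).zip (PySem.List.pyRange 0 k 1)).map (fun ab => ab.1 - ab.2) = cListOf order k := by
  have hkn : k.toNat ≤ order.length := by omega
  apply List.ext_getElem
  · simp [PySem.List.length_pyRange_one, length_wmuOf, length_cListOf]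
    omega
  · intro j h1 h2
    have hj : j < k.toNat := by
      simpa [length_cListOf] using h2
    have hjo : j < order.length := by omega
    rw [List.getElem_map, List.getElem_zip, PySem.List.getElem_pyRange_one]
    have hwj : j < (wmuOf order).length := by rw [length_wmuOf]; exact hjo
    rw [show (wmuOf order)[j] = (wmuOf order).getD j 0 from (List.getD_eq_getElem _ _ hwj).symm,
      getD_wmuOf order j hjo,
      show (cListOf order k)[j] = (cListOf order k).getD j 0 from (List.getD_eq_getElem _ _ h2).symm,
      getD_cListOf order k j hj]
    push_cast
    ring

lemma muA_eq_muB (order : List (List Int)) (k : Int) (hk : k ≤ (order.length : Int))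
    (wi : List Int) (hp : wi.Perm (PySem.List.pyRange 0 k 1)) :
    muAOf order k wi = muBOf order k wi := by
  have hwl : wi.length = k.toNat := by have := perm_len hp; omega
  unfold muAOf muBOf
  apply List.map_congr_left
  intro i hi
  rw [PySem.List.mem_pyRange_one] at hi
  have hik : i = ((i.toNat : Nat) : Int) := by omega
  have hjn : i.toNat < wi.length := by omega
  obtain ⟨ij, hij, hgd, hwiij⟩ := perm_inv_spec hp i.toNat hjn
  rw [hik, PySem.List.pyGetD_natCast, hgd, PySem.List.pyGetD_natCast, PySem.List.pyGetD_natCast]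
  unfold muInvOf
  rw [wmid_eq_cList order k hk]
  have hcl : (cListOf order k).length = wi.length := by rw [length_cListOf, hwl]
  have hijc : ij < ((cListOf order k).zip wi).length := by
    simp [List.length_zip, hcl]
    omega
  have hijcl : ij < (cListOf order k).length := by omega
  rw [List.getD_eq_getElem _ _ (by simpa using hijc), List.getElem_map, List.getElem_zip,
    List.getD_eq_getElem _ _ hijcl, hwiij]

lemma is_dk_iff (v : List Int) :
    is_dk v = true ↔ ∀ j : Nat, j + 1 < v.length → v.getD (j + 1) 0 ≤ v.getD j 0 + 1 := by
  unfold is_dk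
  simp only []
  rw [List.all_eq_true]
  have hd : (PySem.List.enumerate v).map (fun ie => ie.2 - (ie.1 + 1))
      = (PySem.List.pyRange 0 ((v.length : Nat) : Int) 1).map
          (fun j => PySem.List.pyGetD v j 0 - (j + 1)) := by
    rw [PySem.List.enumerate_eq_map_pyRange v 0, List.map_map]
    simp [PySem.List.len]
  have hdl : ((PySem.List.enumerate v).map (fun ie => ie.2 - (ie.1 + 1))).length = v.length := by
    rw [hd]
    simp [PySem.List.length_pyRange_one]
  have hget : ∀ j : Nat, j < v.length →
      ((PySem.List.enumerate v).map (fun ie => ie.2 - (ie.1 + 1))).getD j 0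
        = v.getD j 0 - (j + 1) := by
    intro j hj
    rw [hd, List.getD_eq_getElem?_getD, PySem.List.getElem?_map_pyRange_zero _ _ _ hj]
    simp [PySem.List.pyGetD_natCast]
  constructor
  · intro h j hj
    have := h j (by rw [List.mem_range]; omega)
    rw [hget j (by omega), hget (j + 1) hj] at this
    simp only [decide_eq_true_eq] at this
    push_cast at this ⊢
    omega
  · intro h i hi
    rw [List.mem_range, hdl] at hi
    have := h i (by omega)
    rw [hget i (by omega), hget (i + 1) (by omega)]
    simp only [decide_eq_true_eq]
    push_cast
    omega

-- the heart of the proof: mu is non-increasing-shifted (is_dk) exactly when every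
-- index sits inside the position block of its c-value
lemma core_iff (kI : Int) (cL wi : List Int)
    (hp : wi.Perm (PySem.List.pyRange 0 kI 1)) (hcl : cL.length = wi.length) :
    (∀ j : Nat, j + 1 < wi.length →
        cL.getD ((perm_inv wi).getD (j + 1) 0).toNat 0 ≤ cL.getD ((perm_inv wi).getD j 0).toNat 0)
    ↔ (∀ i : Nat, i < wi.length →
        (((cL.filter (fun x => decide (cL.getD i 0 < x))).length : Int) ≤ wi.getD i 0 ∧
         wi.getD i 0 < ((cL.filter (fun x => decide (cL.getD i 0 ≤ x))).length : Int))) := by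
  have hkn : wi.length = kI.toNat := by have := perm_len hp; omega
  set n := wi.length with hn
  set dl := (List.range n).map (fun j => cL.getD ((perm_inv wi).getD j 0).toNat 0) with hdl
  have hdll : dl.length = n := by simp [hdl]
  have hdlget : ∀ (j : Nat) (hj : j < n), dl[j]'(by omega) = cL.getD ((perm_inv wi).getD j 0).toNat 0 := by
    intro j hj
    simp [hdl]
  -- dl is a permutation of cL
  set wlist := (List.range n).map (fun j => ((perm_inv wi).getD j 0).toNat) with hwlist
  have hwlen : wlist.length = n := by simp [hwlist]
  have hwget : ∀ (j : Nat) (hj : j < n), wlist[j]'(by omega) = ((perm_inv wi).getD j 0).toNat := by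
    intro j hj
    simp [hwlist]
  have hsub : wlist ⊆ List.range n := by
    intro x hx
    rw [hwlist, List.mem_map] at hx
    obtain ⟨j, hj, rfl⟩ := hx
    rw [List.mem_range] at hj
    obtain ⟨ij, hij, hgd, _⟩ := perm_inv_spec hp j hj
    rw [hgd, List.mem_range]
    simpa using hij
  have hwnd : wlist.Nodup := by
    rw [hwlist]
    refine List.Nodup.map_on ?_ List.nodup_range
    intro x hx y hy hxy
    rw [List.mem_range] at hx hy
    obtain ⟨ix, hix, hgx, hwx⟩ := perm_inv_spec hp x hx
    obtain ⟨iy, hiy, hgy, hwy⟩ := perm_inv_spec hp y hy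
    rw [hgx, hgy] at hxy
    have : ix = iy := by omega
    subst this
    have : (x : Int) = (y : Int) := by rw [← hwx, ← hwy]
    omega
  have hwperm : wlist.Perm (List.range n) :=
    (List.subperm_of_subset hwnd hsub).perm_of_length_le (by simp [hwlen])
  have hdleq : dl = wlist.map (fun m => cL.getD m 0) := by
    rw [hdl, hwlist, List.map_map]
    rfl
  have hrange_map : (List.range n).map (fun m => cL.getD m 0) = cL := by
    apply List.ext_getElem (by simp [hcl])
    intro j h1 h2
    rw [List.getElem_map, List.getElem_range, List.getD_eq_getElem _ _ h2]
  have hdperm : dl.Perm cL := by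
    rw [hdleq]
    have := hwperm.map (fun m => cL.getD m 0)
    rwa [hrange_map] at this
  have hcount : ∀ q : Int → Bool, (cL.filter q).length = dl.countP q := by
    intro q
    rw [← List.countP_eq_length_filter]
    exact (hdperm.countP_eq q).symm
  constructor
  · -- non-increasing ⇒ blocks
    intro hadj i hi
    have hpw : dl.Pairwise (fun a b : Int => b ≤ a) := by
      haveI : Trans (fun a b : Int => b ≤ a) (fun a b : Int => b ≤ a) (fun a b : Int => b ≤ a) :=
        ⟨fun h1 h2 => le_trans h2 h1⟩
      refine List.isChain_iff_pairwise.mp (List.isChain_iff_getElem.mpr ?_)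
      intro j hj
      have hjn : j + 1 < n := by omega
      rw [hdlget j (by omega), hdlget (j + 1) (by omega)]
      exact hadj j hjn
    have hwb := perm_bounds hp (wi[i]'(by omega)) (List.getElem_mem (by omega))
    set p : Nat := (wi[i]'(by omega)).toNat with hpdef
    have hpn : p < n := by omega
    have hdp : dl[p]'(by omega) = cL.getD i 0 := by
      rw [hdlget p hpn]
      have := perm_inv_at hp i (by omega)
      rw [hpdef, this]
      simp
    have hgdw : wi.getD i 0 = (p : Int) := by
      rw [List.getD_eq_getElem _ _ (by omega)]
      omega
    constructor
    · rw [hcount, hgdw]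
      have h0 : dl.countP (fun x => decide (cL.getD i 0 < x)) ≤ p := by
        conv_lhs => rw [← List.take_append_drop p dl]
        rw [List.countP_append]
        have hdrop : (dl.drop p).countP (fun x => decide (cL.getD i 0 < x)) = 0 := by
          rw [List.countP_eq_zero]
          intro a ha
          obtain ⟨m, hm, rfl⟩ := List.mem_iff_getElem.mp ha
          rw [List.getElem_drop]
          have hpm : p + m < n := by
            have := hm
            simp [hdll] at this
            omega
          have hle : dl[p + m]'(by omega) ≤ dl[p]'(by omega) := by
            rcases Nat.eq_zero_or_pos m with rfl | hmpos
            · simp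
            · exact List.pairwise_iff_getElem.mp hpw p (p + m) (by omega) (by omega) (by omega)
          rw [hdp] at hle
          simp only [decide_eq_true_eq]
          omega
        rw [hdrop, Nat.add_zero]
        exact le_trans (List.countP_le_length) (by simp [List.length_take])
      exact_mod_cast h0
    · rw [hcount, hgdw]
      have h1 : p + 1 ≤ dl.countP (fun x => decide (cL.getD i 0 ≤ x)) := by
        conv_rhs => rw [← List.take_append_drop (p + 1) dl]
        rw [List.countP_append]
        have htake : (dl.take (p + 1)).countP (fun x => decide (cL.getD i 0 ≤ x))
            = (dl.take (p + 1)).length := by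
          rw [List.countP_eq_length]
          intro a ha
          obtain ⟨m, hm, rfl⟩ := List.mem_iff_getElem.mp ha
          rw [List.getElem_take]
          have hmp : m ≤ p := by
            have := hm
            simp [hdll, List.length_take] at this
            omega
          have hge : dl[p]'(by omega) ≤ dl[m]'(by omega) := by
            rcases Nat.lt_or_ge m p with hlt | hge'
            · exact List.pairwise_iff_getElem.mp hpw m p (by omega) (by omega) (by omega)
            · have : m = p := by omega
              subst this
              exact le_refl _
          rw [hdp] at hge
          simp only [decide_eq_true_eq]
          omega
        have hlt : (dl.take (p + 1)).length = p + 1 := by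
          simp [List.length_take]
          omega
        rw [htake, hlt]
        omega
      exact_mod_cast h1
  · -- blocks ⇒ non-increasing
    intro hbd j hj
    obtain ⟨ij, hij, hgdj, hwij⟩ := perm_inv_spec hp j (by omega)
    obtain ⟨ij1, hij1, hgdj1, hwij1⟩ := perm_inv_spec hp (j + 1) hj
    rw [hgdj, hgdj1]
    simp only [Int.toNat_natCast]
    by_contra hcon
    have hmono : (cL.filter (fun x => decide (cL.getD ij1 0 ≤ x))).length
        ≤ (cL.filter (fun x => decide (cL.getD ij 0 < x))).length := by
      rw [← List.countP_eq_length_filter, ← List.countP_eq_length_filter]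
      apply List.countP_mono_left
      intro a _ ha
      simp only [decide_eq_true_eq] at ha ⊢
      omega
    have hb1 := (hbd ij (by omega)).1
    have hb2 := (hbd ij1 (by omega)).2
    rw [List.getD_eq_getElem _ _ hij, hwij] at hb1
    rw [List.getD_eq_getElem _ _ hij1, hwij1] at hb2
    omega

lemma isdk_eq_chk (order : List (List Int)) (k : Int) (hk : k ≤ (order.length : Int))
    (wi : List Int) (hp : wi.Perm (PySem.List.pyRange 0 k 1)) :
    is_dk (muAOf order k wi) = chk (bndsOf order k) wi := by
  have hwl : wi.length = k.toNat := by have := perm_len hp; omega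
  have hcl : (cListOf order k).length = wi.length := by rw [length_cListOf, hwl]
  have hmulen : (muAOf order k wi).length = wi.length := by
    simp [muAOf, PySem.List.length_pyRange_one, hwl]
  have hmu : ∀ j : Nat, j < wi.length →
      (muAOf order k wi).getD j 0
        = (cListOf order k).getD ((perm_inv wi).getD j 0).toNat 0 + j := by
    intro j hj
    rw [muA_eq_muB order k hk wi hp]
    obtain ⟨ij, hij, hgd, hwiij⟩ := perm_inv_spec hp j hj
    unfold muBOf
    rw [pyRange_zero_toNat k, List.getD_eq_getElem?_getD,
      PySem.List.getElem?_map_pyRange_zero _ _ _ (by omega)]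
    simp only [Option.getD_some, PySem.List.pyGetD_natCast, hgd, Int.toNat_natCast]
  have hbnd : ∀ i : Nat, i < wi.length →
      (bndsOf order k).getD i (0, 0)
        = ((((cListOf order k).filter (fun x => decide ((cListOf order k).getD i 0 < x))).length : Int),
         (((cListOf order k).filter (fun x => decide ((cListOf order k).getD i 0 ≤ x))).length : Int)) := by
    intro i hi
    have hib : i < (bndsOf order k).length := by rw [length_bndsOf, ← hwl]; exact hi
    have hicl : i < (cListOf order k).length := by rw [length_cListOf, ← hwl]; exact hi
    rw [List.getD_eq_getElem _ _ hib]
    unfold bndsOf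
    rw [List.getElem_map, List.getD_eq_getElem _ _ hicl]
  rw [Bool.eq_iff_iff, is_dk_iff, chk_iff _ _ (by rw [length_bndsOf, hwl])]
  have hiff := core_iff k (cListOf order k) wi hp hcl
  constructor
  · intro h i hi
    rw [length_bndsOf, ← hwl] at hi
    have hcore := hiff.mp (by
      intro j hj
      have := h j (by omega)
      rw [hmu j (by omega), hmu (j + 1) (by omega)] at this
      omega) i hi
    rw [hbnd i hi]
    exact hcore
  · intro h j hj
    rw [hmulen] at hj
    have hcore := hiff.mpr (by
      intro i hi
      have := h i (by rw [length_bndsOf, ← hwl]; exact hi)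
      rw [hbnd i hi] at this
      exact this) j hj
    rw [hmu j (by omega), hmu (j + 1) (by omega)]
    omega

lemma portA_char (l : List Int) (order : List (List Int)) (k : Int) :
    find_possible_wmu l order k =
      if dominates l (wmuOf order) then
        ((PySem.List.permutations (PySem.List.pyRange 0 k 1)
            (PySem.List.pyRange 0 k 1).length).filter
          (fun wi => is_dk (muAOf order k wi))).map
          (fun wi => (perm_inv wi, muAOf order k wi, wmuOf order))
      else [] := by
  unfold find_possible_wmu
  simp only []
  rw [show ((PySem.List.enumerate order).map (fun ie => PySem.List.pyGetD ie.2 0 0 + ie.1))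
      = wmuOf order from rfl]
  by_cases hd : dominates l (wmuOf order) = true
  · rw [if_neg (by simp [hd]), if_pos hd]
    have hfold := PySem.List.foldl_append_if
      (p := fun wi => is_dk (muAOf order k wi))
      (f := fun wi => ((perm_inv wi, muAOf order k wi, wmuOf order) : List Int × List Int × List Int))
      (l := PySem.List.permutations (PySem.List.pyRange 0 k 1) (PySem.List.pyRange 0 k 1).length)
      (acc := [])
    simp only [muAOf, muInvOf, List.nil_append] at hfold
    exact hfold
  · rw [if_neg hd, if_pos (by simp [Bool.eq_false_iff.mpr hd])]

lemma portB_char (l : List Int) (order : List (List Int)) (k : Int) :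
    find_possible_wmu_alt l order k =
      if dominates l (wmuOf order) then
        (bGen (bndsOf order k) []).map
          (fun wi => (perm_inv wi, muBOf order k wi, wmuOf order))
      else [] := by
  unfold find_possible_wmu_alt
  simp only []
  rw [show ((PySem.List.enumerate order).map (fun ie => PySem.List.pyGetD ie.2 0 0 + ie.1))
      = wmuOf order from rfl]
  rw [show PySem.List.pyRange 0 (if 0 < k then k else 0) 1 = PySem.List.pyRange 0 k 1 from by
    rw [PySem.List.pyRange_one, PySem.List.pyRange_one]
    congr 2
    split_ifs <;> omega]
  rw [show ((l.zip (wmuOf order)).all (fun ab => decide (ab.2 ≤ ab.1)))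
      = dominates l (wmuOf order) from rfl]
  by_cases hd : dominates l (wmuOf order) = true
  · rw [if_neg (by simp [hd]), if_pos hd]
    rw [show ((PySem.List.pyRange 0 k 1).map
        (fun i => PySem.List.pyGetD (PySem.List.pyGetD order i []) 0 0)) = cListOf order k from rfl]
    rw [show ((cListOf order k).map (fun ci =>
        ((((cListOf order k).filter (fun x => decide (ci < x))).length : Int),
         (((cListOf order k).filter (fun x => decide (ci ≤ x))).length : Int))))
        = bndsOf order k from rfl]
    have hfold := PySem.List.foldl_append_singleton_eq_map
      (f := fun wi => ((perm_inv wi, muBOf order k wi, wmuOf order) : List Int × List Int × List Int))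
      (l := bGen (bndsOf order k) []) (acc := [])
    simp only [muBOf, perm_inv, List.nil_append] at hfold
    exact hfold
  · rw [if_neg hd, if_pos (by simp [Bool.eq_false_iff.mpr hd])]

lemma main_eq (l : List Int) (order : List (List Int)) (k : Int)
    (hpre : Pre_find_possible_wmu l order k) :
    find_possible_wmu l order k = find_possible_wmu_alt l order k := by
  obtain ⟨hrows, hdom⟩ := hpre
  rw [portA_char, portB_char]
  by_cases hd : dominates l (wmuOf order) = true
  · rw [if_pos hd, if_pos hd]
    have hk : k ≤ (order.length : Int) := hdom hd
    have hlenr : (PySem.List.pyRange 0 k 1).length = (bndsOf order k).length := by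
      rw [PySem.List.length_pyRange_one, length_bndsOf]
      omega
    have hfc : ((PySem.List.permutations (PySem.List.pyRange 0 k 1)
        (PySem.List.pyRange 0 k 1).length).filter (fun wi => is_dk (muAOf order k wi)))
        = ((PySem.List.permutations (PySem.List.pyRange 0 k 1)
        (PySem.List.pyRange 0 k 1).length).filter (chk (bndsOf order k))) := by
      apply List.filter_congr
      intro wi hwi
      exact isdk_eq_chk order k hk wi (PySem.List.perm_of_mem_permutations hwi)
    rw [hfc]
    have hmap : ∀ wi ∈ (PySem.List.permutations (PySem.List.pyRange 0 k 1)
        (PySem.List.pyRange 0 k 1).length).filter (chk (bndsOf order k)),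
        ((perm_inv wi, muAOf order k wi, wmuOf order) : List Int × List Int × List Int)
          = (perm_inv wi, muBOf order k wi, wmuOf order) := by
      intro wi hwi
      have hperm := PySem.List.perm_of_mem_permutations (List.mem_of_mem_filter hwi)
      rw [muA_eq_muB order k hk wi hperm]
    rw [List.map_congr_left hmap]
    have hgen : (PySem.List.permutations (PySem.List.pyRange 0 k 1)
        (bndsOf order k).length).filter (chk (bndsOf order k)) = bGen (bndsOf order k) [] := by
      apply filter_perms_eq_bGen k
      · exact PySem.List.pairwise_lt_pyRange_one 0 k
      · intro p
        rw [PySem.List.mem_pyRange_one]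
        simp
      · intro b hb
        simp only [bndsOf, List.mem_map] at hb
        obtain ⟨ci, hci, rfl⟩ := hb
        refine ⟨by positivity, ?_⟩
        have h1 : ((cListOf order k).filter (fun x => decide (ci ≤ x))).length
            ≤ (cListOf order k).length := List.length_filter_le _ _
        have h2 : 0 < (cListOf order k).length := List.length_pos_of_mem hci
        rw [length_cListOf] at h1 h2
        simp only []
        omega
      · exact hlenr
    rw [hlenr, hgen]
  · rw [if_neg hd, if_neg hd]

-- ===== VERDICT (by name: the statement is the Claim_ definition above) =====
theorem find_possible_wmu_spec : Claim_equal_find_possible_wmu := by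
  intro l order k _ hpre
  unfold Spec_find_possible_wmu
  exact main_eq l order k hpre
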